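-- pv_equiv track=rewrite | github.com/pypi-data/pypi-mirror-390 | packages/pyformatjson/pyformatjson-0.2.9.tar.gz/pyformatjson-0.2.9/pyformatjson/core/update_json.py | generate_standard_form
-- ===== SOURCE A (Python) =====
-- from typing import Any
--
-- def generate_standard_form(json_dict: dict[str, Any], conferences_or_journals: str):
--     # Check for duplicate abbreviations in the data.
--     abbr_list = []
--     for pub in json_dict:
--         if conferences_or_journals in json_dict[pub]:
--             for abbr in json_dict[pub][conferences_or_journals]:
--                 if abbr in abbr_list:
--                     raise ValueError(f"Duplicate abbreviation: {abbr} in {conferences_or_journals} {pub}")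
--                 abbr_list.append(abbr)
--
--     # Extract abbreviation and name data from all publications
--     abbr_dict: dict[str, dict[str, list[str]]] = {}
--     for pub in json_dict:
--         if conferences_or_journals in json_dict[pub]:
--             for abbr, v in json_dict[pub][conferences_or_journals].items():
--                 # Store both abbreviated names and full names for each abbreviation
--                 abbr_dict.update({abbr: {"names_abbr": v.get("names_abbr", []), "names_full": v.get("names_full", [])}})
--
--     return abbr_dict
-- ===== SOURCE B (Python) =====
-- def generate_standard_form(json_dict, conferences_or_journals):
--     # One fused pass: abbr_dict's keys double as the seen-set for duplicate detection.
--     abbr_dict = {}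
--     for pub, pv in json_dict.items():
--         if conferences_or_journals in pv:
--             for abbr, v in pv[conferences_or_journals].items():
--                 if abbr in abbr_dict:
--                     raise ValueError(f"Duplicate abbreviation: {abbr} in {conferences_or_journals} {pub}")
--                 abbr_dict[abbr] = {"names_abbr": v.get("names_abbr", []),
--                                    "names_full": v.get("names_full", [])}
--     return abbr_dict
-- ===== Notes on version B (the rewrite author's own statement) =====
-- stated objective: simpler
-- what changed: Fuses A's two separate passes (duplicate-check building a seen-list, then dict construction) into one pass that uses the result dict's keys as the seen-set, eliminating the abbr_list and its linear membership scan.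
import Mathlib
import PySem

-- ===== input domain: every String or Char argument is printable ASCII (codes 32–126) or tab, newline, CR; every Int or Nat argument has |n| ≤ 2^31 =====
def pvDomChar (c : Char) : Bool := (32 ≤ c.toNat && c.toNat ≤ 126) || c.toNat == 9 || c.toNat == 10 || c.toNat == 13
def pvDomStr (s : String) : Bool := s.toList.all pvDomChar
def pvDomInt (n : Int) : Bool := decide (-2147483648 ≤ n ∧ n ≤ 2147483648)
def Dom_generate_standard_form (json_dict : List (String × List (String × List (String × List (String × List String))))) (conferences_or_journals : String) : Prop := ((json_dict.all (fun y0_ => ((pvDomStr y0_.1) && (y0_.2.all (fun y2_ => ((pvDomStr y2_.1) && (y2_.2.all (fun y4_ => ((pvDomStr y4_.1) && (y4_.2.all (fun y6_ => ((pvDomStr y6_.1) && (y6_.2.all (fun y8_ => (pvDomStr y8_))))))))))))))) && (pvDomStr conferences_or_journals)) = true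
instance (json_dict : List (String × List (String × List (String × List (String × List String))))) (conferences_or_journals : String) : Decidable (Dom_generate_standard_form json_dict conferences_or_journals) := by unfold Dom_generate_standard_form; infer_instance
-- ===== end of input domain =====

-- B fuses A's two passes into one, using the result dict's keys as the seen-set (objective: simpler).

-- ===== PORT A =====
-- {"names_abbr": v.get("names_abbr", []), "names_full": v.get("names_full", [])}  (same literal in A and in B)
def gsfEntry (v : List (String × List String)) : List (String × List String) :=
  [("names_abbr", (PySem.Dict.mk v).getD "names_abbr" []),
   ("names_full", (PySem.Dict.mk v).getD "names_full" [])]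

-- A's inner first loop: 'for abbr in json_dict[pub][cj]: if abbr in abbr_list: raise; abbr_list.append(abbr)'
-- none = the ValueError A raises on a duplicate abbreviation.
def gsfCheckAbbrs : List String → List String → Option (List String)
  | [], acc => some acc
  | a :: rest, acc => if a ∈ acc then none else gsfCheckAbbrs rest (acc ++ [a])

-- A's first pass over the publications (keys are iterated with their values: exact for Python dicts).
def gsfCheck (cj : String) : List (String × List (String × List (String × List (String × List String)))) → List String → Option (List String)
  | [], acc => some acc
  | (_, pv) :: rest, acc =>
    if (PySem.Dict.mk pv).contains cj then
      match gsfCheckAbbrs (((PySem.Dict.mk pv).getD cj []).map (·.1)) acc with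
      | none => none
      | some acc' => gsfCheck cj rest acc'
    else gsfCheck cj rest acc

-- A's second pass: build abbr_dict with dict.update (= insert).
def gsfBuild (cj : String) (json : List (String × List (String × List (String × List (String × List String))))) : PySem.Dict String (List (String × List String)) :=
  json.foldl (fun d p =>
    if (PySem.Dict.mk p.2).contains cj then
      ((PySem.Dict.mk p.2).getD cj []).foldl (fun d q => d.insert q.1 (gsfEntry q.2)) d
    else d) PySem.Dict.empty

-- On inputs where A raises (duplicate abbreviation, excluded by Pre_) the port returns [].
def generate_standard_form (json_dict : List (String × List (String × List (String × List (String × List String))))) (conferences_or_journals : String) : List (String × List (String × List String)) :=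
  match gsfCheck conferences_or_journals json_dict [] with
  | none => []
  | some _ => (gsfBuild conferences_or_journals json_dict).items

-- ===== PORT B =====
-- B's inner loop: check-before-insert; the accumulator is the result association list itself.
def gsfAltInsert : List (String × List (String × List String)) → List (String × List (String × List String)) → Option (List (String × List (String × List String)))
  | [], acc => some acc
  | (abbr, v) :: rest, acc =>
    if acc.any (fun p => p.1 == abbr) then none
    else gsfAltInsert rest (acc ++ [(abbr, gsfEntry v)])

-- B's single pass over the publications.
def gsfAltLoop (cj : String) : List (String × List (String × List (String × List (String × List String)))) → List (String × List (String × List String)) → Option (List (String × List (String × List String)))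
  | [], acc => some acc
  | (_, pv) :: rest, acc =>
    if (PySem.Dict.mk pv).contains cj then
      match gsfAltInsert ((PySem.Dict.mk pv).getD cj []) acc with
      | none => none
      | some acc' => gsfAltLoop cj rest acc'
    else gsfAltLoop cj rest acc

def generate_standard_form_alt (json_dict : List (String × List (String × List (String × List (String × List String))))) (conferences_or_journals : String) : List (String × List (String × List String)) :=
  (gsfAltLoop conferences_or_journals json_dict []).getD []

-- ===== PRECONDITION & SPEC =====
-- All abbreviation keys found under conferences_or_journals, in iteration order.
def gsfAllAbbrs (json : List (String × List (String × List (String × List (String × List String))))) (cj : String) : List String :=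
  json.flatMap (fun p => if (PySem.Dict.mk p.2).contains cj then ((PySem.Dict.mk p.2).getD cj []).map (·.1) else [])

-- Pre_ excludes exactly the inputs on which A raises ValueError: a duplicate abbreviation among
-- the publications containing the conferences_or_journals key (B raises the same error there).
def Pre_generate_standard_form (json_dict : List (String × List (String × List (String × List (String × List String))))) (conferences_or_journals : String) : Prop :=
  (gsfAllAbbrs json_dict conferences_or_journals).Nodup
instance (json_dict : List (String × List (String × List (String × List (String × List String))))) (conferences_or_journals : String) : Decidable (Pre_generate_standard_form json_dict conferences_or_journals) := by unfold Pre_generate_standard_form; infer_instance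

def pvWitness_generate_standard_form : (List (String × List (String × List (String × List (String × List String))))) × String :=
  ([("pub1", [("conf", [("ICML", [("names_abbr", ["ICML"]), ("names_full", ["Intl Conf on ML"])])])]),
    ("pub2", [("conf", [("NIPS", [("names_full", ["NeurIPS"])])]), ("other", [])])], "conf")

def Spec_generate_standard_form (json_dict : List (String × List (String × List (String × List (String × List String))))) (conferences_or_journals : String) (out : List (String × List (String × List String))) : Prop := out = generate_standard_form_alt json_dict conferences_or_journals
instance (json_dict : List (String × List (String × List (String × List (String × List String))))) (conferences_or_journals : String) (out : List (String × List (String × List String))) : Decidable (Spec_generate_standard_form json_dict conferences_or_journals out) := by unfold Spec_generate_standard_form; infer_instance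

-- ===== CLAIM (what is proved, stated in full; the proofs are below) =====
def Claim_equal_generate_standard_form : Prop := ∀ (json_dict : List (String × List (String × List (String × List (String × List String))))) (conferences_or_journals : String), Dom_generate_standard_form json_dict conferences_or_journals → Pre_generate_standard_form json_dict conferences_or_journals → Spec_generate_standard_form json_dict conferences_or_journals (generate_standard_form json_dict conferences_or_journals)

-- ===== LEMMAS AND PROOFS =====

lemma gsfAllAbbrs_cons (pub : String) (pv : List (String × List (String × List (String × List String)))) (rest : List (String × List (String × List (String × List (String × List String))))) (cj : String) :
    gsfAllAbbrs ((pub, pv) :: rest) cj =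
      (if (PySem.Dict.mk pv).contains cj then ((PySem.Dict.mk pv).getD cj []).map (·.1) else []) ++ gsfAllAbbrs rest cj := by
  simp [gsfAllAbbrs]

lemma gsfCheckAbbrs_some (abbrs : List String) : ∀ acc : List String, (acc ++ abbrs).Nodup →
    gsfCheckAbbrs abbrs acc = some (acc ++ abbrs) := by
  induction abbrs with
  | nil => intro acc _; simp [gsfCheckAbbrs]
  | cons a rest ih =>
    intro acc h
    have hna : a ∉ acc := by
      intro hmem
      exact (List.disjoint_of_nodup_append h) hmem (by simp)
    rw [gsfCheckAbbrs, if_neg hna, ih (acc ++ [a]) (by simpa using h)]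
    simp

lemma gsfCheck_some (cj : String) (json : List (String × List (String × List (String × List (String × List String))))) :
    ∀ acc : List String, (acc ++ gsfAllAbbrs json cj).Nodup →
    gsfCheck cj json acc = some (acc ++ gsfAllAbbrs json cj) := by
  induction json with
  | nil => intro acc _; simp [gsfCheck, gsfAllAbbrs]
  | cons p rest ih =>
    intro acc h
    obtain ⟨pub, pv⟩ := p
    rw [gsfAllAbbrs_cons] at h ⊢
    by_cases hc : (PySem.Dict.mk pv).contains cj
    · rw [if_pos hc] at h ⊢
      rw [← List.append_assoc] at h ⊢
      have h1 : (acc ++ ((PySem.Dict.mk pv).getD cj []).map (·.1)).Nodup :=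
        List.Nodup.sublist (List.sublist_append_left _ _) h
      simp only [gsfCheck]
      rw [if_pos hc, gsfCheckAbbrs_some _ acc h1]
      exact ih _ h
    · rw [if_neg hc, List.nil_append] at h ⊢
      simp only [gsfCheck]
      rw [if_neg hc]
      exact ih acc h

lemma gsfAltInsert_eq (abbrs : List (String × List (String × List String))) :
    ∀ acc : List (String × List (String × List String)),
    (acc.map (·.1) ++ abbrs.map (·.1)).Nodup →
    gsfAltInsert abbrs acc = some (acc ++ abbrs.map (fun q => (q.1, gsfEntry q.2))) := by
  induction abbrs with
  | nil => intro acc _; simp [gsfAltInsert]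
  | cons q rest ih =>
    intro acc h
    obtain ⟨abbr, v⟩ := q
    have hna : abbr ∉ acc.map (·.1) := by
      intro hmem
      exact (List.disjoint_of_nodup_append h) hmem (by simp)
    have hany : acc.any (fun p => p.1 == abbr) = false := by
      simp only [List.any_eq_false, beq_iff_eq]
      intro p hp hpe
      exact hna (hpe ▸ List.mem_map_of_mem hp)
    rw [gsfAltInsert, hany]
    simp only [Bool.false_eq_true, if_false]
    rw [ih (acc ++ [(abbr, gsfEntry v)]) (by simpa using h)]
    simp

lemma gsfAltLoop_eq (cj : String) (json : List (String × List (String × List (String × List (String × List String))))) :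
    ∀ d : PySem.Dict String (List (String × List String)),
    (d.keys ++ gsfAllAbbrs json cj).Nodup →
    gsfAltLoop cj json d.items =
      some ((json.foldl (fun d p =>
        if (PySem.Dict.mk p.2).contains cj then
          ((PySem.Dict.mk p.2).getD cj []).foldl (fun dd q => dd.insert q.1 (gsfEntry q.2)) d
        else d) d).items) := by
  induction json with
  | nil => intro d _; simp [gsfAltLoop]
  | cons p rest ih =>
    intro d h
    obtain ⟨pub, pv⟩ := p
    rw [gsfAllAbbrs_cons] at h
    by_cases hc : (PySem.Dict.mk pv).contains cj
    · rw [if_pos hc, ← List.append_assoc] at h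
      set abbrs := (PySem.Dict.mk pv).getD cj [] with habbrs
      have h1 : (d.keys ++ abbrs.map (·.1)).Nodup :=
        List.Nodup.sublist (List.sublist_append_left _ _) h
      have h1' : (d.items.map (·.1) ++ abbrs.map (·.1)).Nodup := h1
      have hfresh : ∀ a ∈ abbrs, d.contains a.1 = false := by
        intro a ha
        have hm : a.1 ∈ abbrs.map (·.1) := List.mem_map_of_mem ha
        have hk : a.1 ∉ d.keys := fun hk => (List.disjoint_of_nodup_append h1) hk hm
        rw [PySem.Dict.contains_eq_decide_mem_keys]; simpa
      have hmnd : (abbrs.map (·.1)).Nodup := (List.nodup_append.mp h1).2.1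
      have hitems : (abbrs.foldl (fun dd q => dd.insert q.1 (gsfEntry q.2)) d).items
          = d.items ++ abbrs.map (fun q => (q.1, gsfEntry q.2)) :=
        PySem.Dict.items_foldl_insert_fresh abbrs (·.1) (fun q => gsfEntry q.2) d hfresh hmnd
      set d' := abbrs.foldl (fun dd q => dd.insert q.1 (gsfEntry q.2)) d with hd'
      have hkeys' : (d'.keys ++ gsfAllAbbrs rest cj).Nodup := by
        have he : d'.keys = d.keys ++ abbrs.map (·.1) := by
          show d'.items.map (·.1) = d.items.map (·.1) ++ abbrs.map (·.1)
          rw [hitems, List.map_append, List.map_map]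
          simp
        rw [he, List.append_assoc, ← List.append_assoc]
        exact h
      have hrhs : ((pub, pv) :: rest).foldl (fun d p =>
          if (PySem.Dict.mk p.2).contains cj then
            ((PySem.Dict.mk p.2).getD cj []).foldl (fun dd q => dd.insert q.1 (gsfEntry q.2)) d
          else d) d = rest.foldl (fun d p =>
          if (PySem.Dict.mk p.2).contains cj then
            ((PySem.Dict.mk p.2).getD cj []).foldl (fun dd q => dd.insert q.1 (gsfEntry q.2)) d
          else d) d' := by
        rw [List.foldl_cons]; dsimp only; rw [if_pos hc]
      rw [hrhs]
      simp only [gsfAltLoop]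
      rw [if_pos hc, gsfAltInsert_eq abbrs d.items h1', ← hitems]
      exact ih d' hkeys'
    · rw [if_neg hc, List.nil_append] at h
      have hrhs : ((pub, pv) :: rest).foldl (fun d p =>
          if (PySem.Dict.mk p.2).contains cj then
            ((PySem.Dict.mk p.2).getD cj []).foldl (fun dd q => dd.insert q.1 (gsfEntry q.2)) d
          else d) d = rest.foldl (fun d p =>
          if (PySem.Dict.mk p.2).contains cj then
            ((PySem.Dict.mk p.2).getD cj []).foldl (fun dd q => dd.insert q.1 (gsfEntry q.2)) d
          else d) d := by
        rw [List.foldl_cons]; dsimp only; rw [if_neg hc]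
      rw [hrhs]
      simp only [gsfAltLoop]
      rw [if_neg hc]
      exact ih d h

-- ===== VERDICT (by name: the statement is the Claim_ definition above) =====
theorem generate_standard_form_spec : Claim_equal_generate_standard_form := by
  intro json cj _hDom hPre
  unfold Spec_generate_standard_form
  have hPre' : (gsfAllAbbrs json cj).Nodup := hPre
  have hA : generate_standard_form json cj = (gsfBuild cj json).items := by
    rw [generate_standard_form, gsfCheck_some cj json [] (by simpa using hPre')]
  have hkeysE : ((PySem.Dict.empty : PySem.Dict String (List (String × List String))).keys ++ gsfAllAbbrs json cj).Nodup := by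
    simpa [PySem.Dict.keys_empty] using hPre'
  have hB : gsfAltLoop cj json [] = some ((gsfBuild cj json).items) :=
    gsfAltLoop_eq cj json PySem.Dict.empty hkeysE
  rw [hA, generate_standard_form_alt, hB]
  rfl
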